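-- pv_equiv track=rewrite | github.com/OhadSvirySystem/sprint3.0 | receive.py | find_first_and_last_sequence
-- ===== SOURCE A (Python) =====
-- def find_first_and_last_sequence(lst, sequence):
--     sequence_length = len(sequence)
--     first_index = None
--     last_index = None
--
--     for i in range(len(lst) - sequence_length + 1):
--         if lst[i:i+sequence_length] == sequence:
--             if first_index is None:
--                 first_index = i
--             last_index = i
--
--     return first_index, last_index
-- ===== SOURCE B (Python) =====
-- def find_first_and_last_sequence(lst, sequence):
--     m = len(sequence)
--     limit = len(lst) - m
--     first = None
--     for i in range(limit + 1):
--         if lst[i:i+m] == sequence: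
--             first = i
--             break
--     if first is None:
--         return None, None
--     last = first
--     for j in reversed(range(first, limit + 1)):
--         if lst[j:j+m] == sequence:
--             last = j
--             break
--     return first, last
-- ===== Notes on version B (the rewrite author's own statement) =====
-- stated objective: alternative
-- what changed: Instead of A's single full pass that tests every window and updates both indices, B does a forward scan that breaks at the first match and a backward scan that breaks at the last match; on random inputs the cost is the same.
import Mathlib
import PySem

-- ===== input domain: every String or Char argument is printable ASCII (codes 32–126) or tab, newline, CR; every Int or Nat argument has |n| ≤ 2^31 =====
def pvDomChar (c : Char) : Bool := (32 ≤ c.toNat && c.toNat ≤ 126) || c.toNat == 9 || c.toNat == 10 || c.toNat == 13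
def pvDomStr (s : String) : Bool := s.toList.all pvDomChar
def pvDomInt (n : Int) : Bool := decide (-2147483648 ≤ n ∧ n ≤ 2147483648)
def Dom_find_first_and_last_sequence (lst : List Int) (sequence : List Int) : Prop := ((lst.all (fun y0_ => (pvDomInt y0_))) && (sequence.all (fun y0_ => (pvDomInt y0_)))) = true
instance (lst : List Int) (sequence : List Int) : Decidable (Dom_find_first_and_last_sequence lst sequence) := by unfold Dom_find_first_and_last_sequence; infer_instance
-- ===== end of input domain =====

-- B replaces A's single full pass over all windows by a forward scan that breaks at the
-- first match and a backward scan that breaks at the last match (objective: alternative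
-- decomposition; same worst-case cost).

-- ===== PORT A =====
-- one window test, shared by both ports: lst[i:i+len(sequence)] == sequence
def pvMatchAt (lst : List Int) (sequence : List Int) (i : Int) : Bool :=
  PySem.List.slice lst (some i) (some (i + (sequence.length : Int))) == sequence

def find_first_and_last_sequence (lst : List Int) (sequence : List Int) : Option Int × Option Int :=
  let sequence_length : Int := sequence.length
  (PySem.List.pyRange 0 ((lst.length : Int) - sequence_length + 1) 1).foldl
    (fun (st : Option Int × Option Int) i =>
      if pvMatchAt lst sequence i then
        ((if st.1.isNone then some i else st.1), some i)
      else st)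
    (none, none)

-- ===== PORT B =====
def find_first_and_last_sequence_alt (lst : List Int) (sequence : List Int) : Option Int × Option Int :=
  let m : Int := sequence.length
  let limit : Int := (lst.length : Int) - m
  match (PySem.List.pyRange 0 (limit + 1) 1).find? (pvMatchAt lst sequence) with
  | none => (none, none)
  | some first =>
    match ((PySem.List.pyRange first (limit + 1) 1).reverse).find? (pvMatchAt lst sequence) with
    | some last => (some first, some last)
    | none => (some first, some first)

-- ===== PRECONDITION & SPEC =====
def Spec_find_first_and_last_sequence (lst : List Int) (sequence : List Int) (out : Option Int × Option Int) : Prop := out = find_first_and_last_sequence_alt lst sequence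
instance (lst : List Int) (sequence : List Int) (out : Option Int × Option Int) : Decidable (Spec_find_first_and_last_sequence lst sequence out) := by unfold Spec_find_first_and_last_sequence; infer_instance

-- ===== CLAIM (what is proved, stated in full; the proofs are below) =====
def Claim_equal_find_first_and_last_sequence : Prop := ∀ (lst : List Int) (sequence : List Int), Dom_find_first_and_last_sequence lst sequence → Spec_find_first_and_last_sequence lst sequence (find_first_and_last_sequence lst sequence)

-- ===== LEMMAS AND PROOFS =====

-- A's fold computes (head?, getLast?) of the matching indices, relative to the accumulator.
theorem pvFoldA (p : Int → Bool) (L : List Int) (f l : Option Int) :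
    L.foldl (fun (st : Option Int × Option Int) i =>
      if p i then ((if st.1.isNone then some i else st.1), some i) else st) (f, l)
    = (Option.orElse f (fun _ => (L.filter p).head?),
       Option.orElse ((L.filter p).getLast?) (fun _ => l)) := by
  induction L generalizing f l with
  | nil => simp
  | cons x xs ih =>
    by_cases hx : p x
    · simp only [List.foldl_cons, hx, if_pos, List.filter_cons_of_pos hx]
      rw [ih]
      refine Prod.ext ?_ ?_
      · cases f <;> simp [Option.orElse]
      · cases h : (xs.filter p).getLast? with
        | none =>
          have : xs.filter p = [] := by
            cases hfp : xs.filter p with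
            | nil => rfl
            | cons a as => rw [hfp] at h; simp at h
          simp [this, Option.orElse]
        | some a =>
          cases hfp : xs.filter p with
          | nil => rw [hfp] at h; simp at h
          | cons b bs =>
            rw [hfp] at h
            simp [Option.orElse, List.getLast?_cons, h]
    · simp only [List.foldl_cons, hx, List.filter_cons_of_neg hx, ih]
      simp

-- find? is the head of the filtered list
theorem pvFindHead (p : Int → Bool) (L : List Int) :
    L.find? p = (L.filter p).head? := by
  induction L with
  | nil => rfl
  | cons x xs ih =>
    by_cases hx : p x
    · rw [List.find?_cons_of_pos hx, List.filter_cons_of_pos hx, List.head?_cons]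
    · rw [List.find?_cons_of_neg hx, List.filter_cons_of_neg hx, ih]

-- if find? on an ascending range yields f, then no earlier index matches:
-- the filtered range equals the filtered suffix starting at f, and p f holds, a ≤ f.
theorem pvRangeFind (p : Int → Bool) (a b f : Int)
    (h : (PySem.List.pyRange a b 1).find? p = some f) :
    a ≤ f ∧ f < b ∧ p f = true ∧
      (PySem.List.pyRange a b 1).filter p = (PySem.List.pyRange f b 1).filter p := by
  by_cases hab : a < b
  · rw [PySem.List.pyRange_one_cons hab] at h ⊢
    by_cases ha : p a
    · rw [List.find?_cons_of_pos ha] at h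
      injection h with h; subst h
      exact ⟨le_refl a, hab, ha, by rw [← PySem.List.pyRange_one_cons hab]⟩
    · rw [List.find?_cons_of_neg ha] at h
      have := pvRangeFind p (a+1) b f h
      exact ⟨by omega, this.2.1, this.2.2.1, by rw [List.filter_cons_of_neg ha, this.2.2.2]⟩
  · rw [PySem.List.pyRange_one_eq_nil (by omega)] at h
    simp at h
termination_by (b - a).toNat
decreasing_by omega

-- ===== VERDICT (by name: the statement is the Claim_ definition above) =====
theorem find_first_and_last_sequence_spec : Claim_equal_find_first_and_last_sequence := by
  intro lst sequence _
  unfold Spec_find_first_and_last_sequence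
  simp only [find_first_and_last_sequence, find_first_and_last_sequence_alt]
  rw [pvFoldA]
  set p := pvMatchAt lst sequence with hp
  set b : Int := (lst.length : Int) - (sequence.length : Int) + 1 with hb
  cases hf : (PySem.List.pyRange 0 b 1).find? p with
  | none =>
    have hnil : (PySem.List.pyRange 0 b 1).filter p = [] := by
      have := pvFindHead p (PySem.List.pyRange 0 b 1)
      rw [hf] at this
      cases h : (PySem.List.pyRange 0 b 1).filter p with
      | nil => rfl
      | cons x xs => rw [h] at this; simp at this
    simp [hnil, Option.orElse]
  | some f =>
    dsimp only
    obtain ⟨h0f, hfb, hpf, hfilter⟩ := pvRangeFind p 0 b f hf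
    have hcons : PySem.List.pyRange f b 1 = f :: PySem.List.pyRange (f+1) b 1 :=
      PySem.List.pyRange_one_cons hfb
    have hfil : (PySem.List.pyRange 0 b 1).filter p
        = f :: (PySem.List.pyRange (f+1) b 1).filter p := by
      rw [hfilter, hcons, List.filter_cons_of_pos hpf]
    have hrev : ((PySem.List.pyRange f b 1).reverse).find? p
        = ((PySem.List.pyRange f b 1).filter p).getLast? := by
      rw [pvFindHead, List.filter_reverse, List.head?_reverse]
    cases hl : ((PySem.List.pyRange f b 1).filter p).getLast? with
    | none =>
      exfalso
      rw [hcons, List.filter_cons_of_pos hpf] at hl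
      simp at hl
    | some last =>
      rw [hrev, hl]
      refine Prod.ext ?_ ?_
      · rw [hfil]; simp [Option.orElse]
      · rw [hfilter, hl]; simp [Option.orElse]
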